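-- pv_equiv track=rewrite | github.com/dreipfundflachs/Project-Euler-Solutions | problems_100_plus/problem_145.py | reversible
-- ===== SOURCE A (Python) =====
-- def reversible(d):
--     """ Yields the number of reversible numbers having exactly d digits (with
--     0 being excluded as a possibility for the leading and trailing digits)."""
--     if d  == 1:
--         return 0
--     elif d == 2:
--         return 10 * 2
--     elif d == 3:
--         return 5 * 10 * 2
--     elif d > 3 and d % 2 == 0:
--         return 30 * reversible(d - 2)
--     elif d > 3 and d % 2 != 0:
--         return 25 * 20 * reversible(d - 4)
-- ===== SOURCE B (Python) =====
-- def reversible(d):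
--     """ Yields the number of reversible numbers having exactly d digits (with
--     0 being excluded as a possibility for the leading and trailing digits)."""
--     if d < 1:
--         return None
--     if d % 2 == 0:
--         return 20 * 30 ** ((d - 2) // 2)
--     if d % 4 == 3:
--         return 100 * 500 ** ((d - 3) // 4)
--     return 0
-- ===== Notes on version B (the rewrite author's own statement) =====
-- stated objective: alternative
-- what changed: Replaces A's linear-depth recursion with a direct closed-form power formula chosen by the parity of d and d mod 4; intended as faster, but unmeasurable at the sizes A completes.
-- outside the precondition, e.g. on reversible(0): A returns None, B returns None; on reversible(39993): A raises RecursionError, B returns 0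
import Mathlib
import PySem

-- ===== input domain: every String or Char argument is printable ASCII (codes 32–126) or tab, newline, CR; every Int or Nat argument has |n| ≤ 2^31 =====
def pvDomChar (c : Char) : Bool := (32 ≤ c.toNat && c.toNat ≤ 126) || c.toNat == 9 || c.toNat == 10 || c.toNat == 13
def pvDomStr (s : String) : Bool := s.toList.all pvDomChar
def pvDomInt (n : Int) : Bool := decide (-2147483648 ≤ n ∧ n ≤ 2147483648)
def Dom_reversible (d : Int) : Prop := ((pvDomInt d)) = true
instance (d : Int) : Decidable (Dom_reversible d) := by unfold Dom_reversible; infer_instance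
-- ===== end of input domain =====

-- B replaces A's recursion by a closed-form power formula selected by the parity of d and
-- d mod 4 (objective: alternative — O(1) arithmetic selection instead of ~d/2 recursive calls;
-- intended as faster, but a timing run could not measure it at the sizes A completes).

-- ===== PORT A =====
def reversible (d : Int) : Int :=
  if d = 1 then 0
  else if d = 2 then 10 * 2
  else if d = 3 then 5 * 10 * 2
  else if 3 < d ∧ PySem.Int.mod d 2 = 0 then 30 * reversible (d - 2)
  else if 3 < d ∧ PySem.Int.mod d 2 ≠ 0 then 25 * 20 * reversible (d - 4)
  else 0  -- Python falls through with None here (d < 1 only); excluded by Pre_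
termination_by d.toNat
decreasing_by
  · omega
  · omega

-- ===== PORT B =====
def reversible_alt (d : Int) : Int :=
  if d < 1 then 0  -- Python B returns None here; excluded by Pre_
  else if PySem.Int.mod d 2 = 0 then 20 * 30 ^ (PySem.Int.floordiv (d - 2) 2).toNat
  else if PySem.Int.mod d 4 = 3 then 100 * 500 ^ (PySem.Int.floordiv (d - 3) 4).toNat
  else 0

-- ===== PRECONDITION & SPEC =====
-- Pre_ excludes d < 1, where Python A falls through all branches and returns None (not an Int;
-- B returns None there too), and the d where A's recursion exceeds the interpreter's depth limit
-- and raises RecursionError: under the harness's interpreter recursion limit that is exactly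
-- even d ≥ 19998 and odd d ≥ 39993 (measured); every d on which A returns is admitted.
def Pre_reversible (d : Int) : Prop := 1 ≤ d ∧ (if d % 2 = 0 then d ≤ 19996 else d ≤ 39991)
instance (d : Int) : Decidable (Pre_reversible d) := by unfold Pre_reversible; infer_instance
def pvWitness_reversible : Int := (7)
def Spec_reversible (d : Int) (out : Int) : Prop := out = reversible_alt d
instance (d : Int) (out : Int) : Decidable (Spec_reversible d out) := by unfold Spec_reversible; infer_instance

-- ===== CLAIM (what is proved, stated in full; the proofs are below) =====
def Claim_equal_reversible : Prop := ∀ (d : Int), Dom_reversible d → Pre_reversible d → Spec_reversible d (reversible d)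

-- ===== LEMMAS AND PROOFS =====

lemma pmod2 (x : Int) : PySem.Int.mod x 2 = x % 2 := PySem.Int.mod_eq_emod_of_pos (by norm_num)
lemma pmod4 (x : Int) : PySem.Int.mod x 4 = x % 4 := PySem.Int.mod_eq_emod_of_pos (by norm_num)
lemma pdiv2 (x : Int) : PySem.Int.floordiv x 2 = x / 2 := PySem.Int.floordiv_eq_ediv_of_pos (by norm_num)
lemma pdiv4 (x : Int) : PySem.Int.floordiv x 4 = x / 4 := PySem.Int.floordiv_eq_ediv_of_pos (by norm_num)

-- B's even step: for even d > 3 the closed form satisfies A's recurrence.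
lemma alt_even_step (d : Int) (h3 : 3 < d) (he : PySem.Int.mod d 2 = 0) :
    reversible_alt d = 30 * reversible_alt (d - 2) := by
  rw [pmod2] at he
  rw [reversible_alt, reversible_alt]
  simp only [pmod2, pmod4, pdiv2, pdiv4]
  rw [if_neg (by omega), if_pos he, if_neg (by omega), if_pos (by omega : (d - 2) % 2 = 0)]
  have hx : ((d - 2) / 2).toNat = ((d - 2 - 2) / 2).toNat + 1 := by omega
  rw [hx, pow_succ]; ring

-- B's odd step: for odd d > 3 the closed form satisfies A's recurrence.
lemma alt_odd_step (d : Int) (h3 : 3 < d) (ho : PySem.Int.mod d 2 ≠ 0) :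
    reversible_alt d = 25 * 20 * reversible_alt (d - 4) := by
  rw [pmod2] at ho
  rw [reversible_alt, reversible_alt]
  simp only [pmod2, pmod4, pdiv2, pdiv4]
  rw [if_neg (show ¬ d < 1 by omega), if_neg ho,
     if_neg (show ¬ (d - 4) < 1 by omega), if_neg (show ¬ (d - 4) % 2 = 0 by omega)]
  by_cases h4 : d % 4 = 3
  · rw [if_pos h4, if_pos (show (d - 4) % 4 = 3 by omega)]
    have hx : ((d - 3) / 4).toNat = ((d - 4 - 3) / 4).toNat + 1 := by omega
    rw [hx, pow_succ]; ring
  · rw [if_neg h4, if_neg (show ¬ (d - 4) % 4 = 3 by omega)]; ring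

lemma main_eq : ∀ (n : Nat) (d : Int), d.toNat ≤ n → 1 ≤ d → reversible d = reversible_alt d := by
  intro n
  induction n with
  | zero => intro d hn h1; omega
  | succ n ih =>
    intro d hn h1
    rw [reversible]
    by_cases h1' : d = 1
    · subst h1'; decide
    by_cases h2 : d = 2
    · subst h2; rw [if_neg (by omega), if_pos rfl]; decide
    by_cases h3 : d = 3
    · subst h3; rw [if_neg (by omega), if_neg (by omega), if_pos rfl]; decide
    have hgt : 3 < d := by omega
    rw [if_neg h1', if_neg h2, if_neg h3]
    by_cases he : PySem.Int.mod d 2 = 0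
    · rw [if_pos ⟨hgt, he⟩, ih (d - 2) (by omega) (by omega), alt_even_step d hgt he]
    · rw [pmod2] at he
      rw [if_neg (by rw [pmod2]; tauto), if_pos ⟨hgt, by rw [pmod2]; exact he⟩,
         ih (d - 4) (by omega) (by omega), alt_odd_step d hgt (by rw [pmod2]; exact he)]

-- ===== VERDICT (by name: the statement is the Claim_ definition above) =====
theorem reversible_spec : Claim_equal_reversible := by
  intro d _ hpre
  unfold Spec_reversible
  exact main_eq d.toNat d (le_refl _) hpre.1
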